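-- pv_equiv track=rewrite | github.com/ZETRO2/CompSci12 | 2024/2024_S4.py | generate_colorings
-- ===== SOURCE A (Python) =====
-- def generate_colorings(painted_roads):
--     if not painted_roads:
--         yield []
--         return
--
--     n = len(painted_roads)
--     for i in range(2**n):
--         coloring = []
--         for j in range(n):
--             if (i >> j) & 1:
--                 coloring.append('R')
--             else:
--                 coloring.append('B')
--         yield coloring
-- ===== SOURCE B (Python) =====
-- def generate_colorings(painted_roads):
--     # Build all colorings by iterative extension: each road doubles the set,
--     # appending 'B' then 'R' in the new (slowest-varying) last position.
--     colorings = [[]]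
--     for _ in painted_roads:
--         colorings = [c + [x] for x in 'BR' for c in colorings]
--     yield from colorings
-- ===== Notes on version B (the rewrite author's own statement) =====
-- stated objective: alternative
-- what changed: Replaces the per-index bit-extraction double loop (decode each i in range(2**n) bit by bit) with an iterative doubling construction that extends every partial coloring by 'B' and by 'R' per road, producing the same colorings in the same order.
import Mathlib
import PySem

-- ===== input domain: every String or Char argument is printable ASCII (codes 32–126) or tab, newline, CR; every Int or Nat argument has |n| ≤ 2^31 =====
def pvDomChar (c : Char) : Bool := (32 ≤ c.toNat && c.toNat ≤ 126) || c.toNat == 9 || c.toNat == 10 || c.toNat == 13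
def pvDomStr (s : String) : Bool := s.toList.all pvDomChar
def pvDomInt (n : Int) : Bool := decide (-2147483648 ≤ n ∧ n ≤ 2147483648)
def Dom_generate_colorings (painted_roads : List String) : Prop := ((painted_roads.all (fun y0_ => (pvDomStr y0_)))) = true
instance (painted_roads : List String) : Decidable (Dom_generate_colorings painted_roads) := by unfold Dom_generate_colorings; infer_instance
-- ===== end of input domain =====

-- B replaces A's per-index bit-extraction double loop with an iterative doubling
-- construction (extend each partial coloring by 'B' then 'R' per road); same order, same cost.

-- ===== PORT A =====
-- literal port of A: for each i in range(2**n), decode bit j of i into 'R'/'B' for j in range(n).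
-- '2**n' is ported as (2:Int) ^ n.toNat, exact since n = len(painted_roads) ≥ 0;
-- '(i >> j) & 1' is PySem.Int.band (i >>> j.toNat) 1, exact since j ∈ range(n) is ≥ 0.
def generate_colorings (painted_roads : List String) : List (List String) :=
  if painted_roads = [] then
    [[]]
  else
    (PySem.List.pyRange 0 ((2 : Int) ^ ((painted_roads.length : Int)).toNat) 1).map (fun i =>
      (PySem.List.pyRange 0 (painted_roads.length : Int) 1).foldl
        (fun coloring j =>
          if PySem.Int.band (i >>> j.toNat) 1 ≠ 0 then coloring ++ ["R"]
          else coloring ++ ["B"])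
        [])

-- ===== PORT B =====
-- literal port of Source B: colorings = [[]]; for _ in painted_roads:
--   colorings = [c + [x] for x in 'BR' for c in colorings]; yield from colorings
def generate_colorings_alt (painted_roads : List String) : List (List String) :=
  painted_roads.foldl
    (fun colorings _ => ["B", "R"].flatMap (fun x => colorings.map (fun c => c ++ [x])))
    [[]]

-- ===== PRECONDITION & SPEC =====
def Spec_generate_colorings (painted_roads : List String) (out : List (List String)) : Prop := out = generate_colorings_alt painted_roads
instance (painted_roads : List String) (out : List (List String)) : Decidable (Spec_generate_colorings painted_roads out) := by unfold Spec_generate_colorings; infer_instance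

-- ===== CLAIM (what is proved, stated in full; the proofs are below) =====
def Claim_equal_generate_colorings : Prop := ∀ (painted_roads : List String), Dom_generate_colorings painted_roads → Spec_generate_colorings painted_roads (generate_colorings painted_roads)

-- ===== LEMMAS AND PROOFS =====

/-- The doubling step of B (definitionally the foldl body of `generate_colorings_alt`). -/
def pvStep (cs : List (List String)) : List (List String) :=
  ["B", "R"].flatMap (fun x => cs.map (fun c => c ++ [x]))

/-- Closed description of A's output for `n` roads: bit `j` of `k` decides entry `j`. -/
def pvAcol (n : Nat) : List (List String) :=
  (List.range (2 ^ n)).map (fun k =>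
    (List.range n).map (fun j => if k.testBit j then "R" else "B"))

lemma pvFoldl_snoc {α : Type} (g : α → String) :
    ∀ (l : List α) (init : List String),
      l.foldl (fun acc j => acc ++ [g j]) init = init ++ l.map g := by
  intro l
  induction l with
  | nil => simp
  | cons a t ih => intro init; simp [ih]

lemma pvStep_eq (cs : List (List String)) :
    pvStep cs = cs.map (· ++ ["B"]) ++ cs.map (· ++ ["R"]) := by
  simp [pvStep, List.flatMap]

lemma pvBit_cast (k j : Nat) :
    (PySem.Int.band ((k : Int) >>> j) 1 ≠ 0) ↔ k.testBit j = true := by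
  have h1 : ((k : Int) >>> j) = ((k >>> j : Nat) : Int) := (Int.natCast_shiftRight k j).symm
  rw [h1, show (1 : Int) = ((1 : Nat) : Int) from rfl, PySem.Int.band_natCast,
    Nat.testBit_eq_decide_div_mod_eq, Nat.and_one_is_mod, Nat.shiftRight_eq_div_pow]
  constructor
  · intro h
    have : k / 2 ^ j % 2 ≠ 0 := by exact_mod_cast h
    simp only [decide_eq_true_eq]
    omega
  · intro h
    have h' : k / 2 ^ j % 2 = 1 := by simpa using h
    simp [h']

lemma pvA_eq_acol (painted_roads : List String) :
    generate_colorings painted_roads = pvAcol painted_roads.length := by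
  by_cases h : painted_roads = []
  · subst h; simp [generate_colorings, pvAcol]
  · unfold generate_colorings
    rw [if_neg h]
    set n := painted_roads.length with hn
    have hrng : PySem.List.pyRange 0 (n : Int) 1 =
        List.map (fun k : Nat => (k : Int)) (List.range n) := by
      rw [PySem.List.pyRange_one]
      rw [show ((n : Int) - 0).toNat = n by omega]
      apply List.map_congr_left
      intro k _
      omega
    have hrng2 : PySem.List.pyRange 0 ((2 : Int) ^ ((n : Int)).toNat) 1 =
        List.map (fun k : Nat => (k : Int)) (List.range (2 ^ n)) := by
      rw [PySem.List.pyRange_one]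
      simp only [Int.toNat_natCast, Int.sub_zero]
      rw [show ((2 : Int) ^ n) = ((2 ^ n : Nat) : Int) by push_cast; ring, Int.toNat_natCast]
      apply List.map_congr_left
      intro k _
      omega
    rw [hrng2, List.map_map, pvAcol]
    apply List.map_congr_left
    intro k _
    simp only [Function.comp]
    have hbody : (fun (coloring : List String) (j : Int) =>
        if PySem.Int.band ((k : Int) >>> j.toNat) 1 ≠ 0 then coloring ++ ["R"]
        else coloring ++ ["B"]) =
        (fun (coloring : List String) (j : Int) =>
          coloring ++ [if PySem.Int.band ((k : Int) >>> j.toNat) 1 ≠ 0 then "R" else "B"]) := by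
      funext c j; split <;> simp [*]
    rw [hbody, pvFoldl_snoc, hrng, List.map_map, List.nil_append]
    apply List.map_congr_left
    intro j _
    simp only [Function.comp, Int.toNat_natCast]
    by_cases hb : k.testBit j
    · rw [if_pos ((pvBit_cast k j).mpr hb), if_pos hb]
    · rw [if_neg (fun hc => hb ((pvBit_cast k j).mp hc)), if_neg hb]

lemma pvAcol_succ (n : Nat) : pvAcol (n + 1) = pvStep (pvAcol n) := by
  rw [pvStep_eq, pvAcol, pvAcol]
  have hinner : ∀ k : Nat,
      (List.range (n + 1)).map (fun j => if k.testBit j then "R" else "B") =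
      (List.range n).map (fun j => if k.testBit j then "R" else "B") ++
        [if k.testBit n then "R" else "B"] := by
    intro k
    rw [List.range_succ, List.map_append]
    rfl
  have hsplit : List.range (2 ^ (n + 1)) =
      List.range (2 ^ n) ++ (List.range (2 ^ n)).map (fun x => 2 ^ n + x) := by
    rw [show 2 ^ (n + 1) = 2 ^ n + 2 ^ n by ring]
    exact List.range_add
  simp only [hinner]
  rw [hsplit, List.map_append, List.map_map]
  congr 1
  · -- first block: k < 2^n, bit n is 0, so the last entry is "B"
    rw [List.map_map]
    apply List.map_congr_left
    intro k hk
    simp only [Function.comp]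
    rw [Nat.testBit_eq_false_of_lt (List.mem_range.mp hk)]
    rfl
  · -- second block: element 2^n + k with k < 2^n: bit n is 1, lower bits are k's
    rw [List.map_map]
    apply List.map_congr_left
    intro k hk
    have hk' := List.mem_range.mp hk
    simp only [Function.comp]
    have hbitn : (2 ^ n + k).testBit n = true := by
      rw [Nat.testBit_two_pow_add_eq, Nat.testBit_eq_false_of_lt hk']
      rfl
    have hlow : (List.range n).map (fun j => if (2 ^ n + k).testBit j then "R" else "B") =
        (List.range n).map (fun j => if k.testBit j then "R" else "B") := by
      apply List.map_congr_left
      intro j hj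
      rw [Nat.testBit_two_pow_add_gt (List.mem_range.mp hj) k]
    rw [hbitn, hlow]
    rfl

lemma pvB_foldl : ∀ (l : List String) (m : Nat),
    l.foldl (fun colorings _ =>
      ["B", "R"].flatMap (fun x => colorings.map (fun c => c ++ [x]))) (pvAcol m) =
    pvAcol (m + l.length) := by
  intro l
  induction l with
  | nil => intro m; simp
  | cons a t ih =>
    intro m
    have hstep : ["B", "R"].flatMap (fun x => (pvAcol m).map (fun c => c ++ [x])) =
        pvAcol (m + 1) := (pvAcol_succ m).symm
    simp only [List.foldl_cons]
    rw [hstep, ih]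
    congr 1
    simp [List.length_cons]
    omega

lemma pvB_eq_acol (painted_roads : List String) :
    generate_colorings_alt painted_roads = pvAcol painted_roads.length := by
  unfold generate_colorings_alt
  have h0 : pvAcol 0 = [[]] := by simp [pvAcol]
  rw [← h0, pvB_foldl]
  simp

-- ===== VERDICT (by name: the statement is the Claim_ definition above) =====
theorem generate_colorings_spec : Claim_equal_generate_colorings := by
  intro painted_roads _
  unfold Spec_generate_colorings
  rw [pvA_eq_acol, pvB_eq_acol]
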